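-- pv_equiv track=rewrite | github.com/nabuel/Nonograma | paquete/funciones_especificas.py | calcular_inicio_cuadrado
-- ===== SOURCE A (Python) =====
-- def calcular_inicio_cuadrado(posicion_click: tuple,
--                     aumento: int,
--                     coordenada_inicial:tuple)-> tuple:
--     '''
--     Según donde se clickea se calcula la coordenada de inicio del cuadrado.
--
--     PARAMETROS: "posicion_click" -> coordenada donde se cliqueó.
--                 "aumento" -> la longitud del cuadrado.
--                 "coordenda_inicial" -> coordenda donde se inició la grilla.
--
--     RETORNO: La coordenada de inicio del cuadrado.
--     '''
--     x = posicion_click[0]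
--     x_inicio = coordenada_inicial[0]
--
--     y = posicion_click[1]
--     y_inicio = coordenada_inicial[1]
--
--     while x != x_inicio or y != y_inicio:
--         if x < x_inicio + aumento:
--             x = int(x_inicio)
--         elif x == x_inicio:
--             pass
--         else:
--             x_inicio += aumento
--
--         if y < y_inicio + aumento:
--             y = y_inicio
--         elif y == int(y_inicio):
--             pass
--         else:
--             y_inicio += aumento
--
--     return x,y
-- ===== SOURCE B (Python) =====
-- def calcular_inicio_cuadrado(posicion_click: tuple,
--                     aumento: int,
--                     coordenada_inicial: tuple) -> tuple:
--     '''Closed-form: snap each coordinate to its grid cell origin by floor division.'''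
--     x, y = posicion_click[0], posicion_click[1]
--     x0, y0 = coordenada_inicial[0], coordenada_inicial[1]
--     return (x0 + aumento * max(0, (x - x0) // aumento),
--             y0 + aumento * max(0, (y - y0) // aumento))
-- ===== Notes on version B (the rewrite author's own statement) =====
-- stated objective: simpler
-- what changed: Replaces A's step-by-step while loop (advancing the cell origin by 'aumento' until the click falls inside) with a closed-form floor-division formula computing each snapped coordinate directly; fewer steps asymptotically, though a timing run could not verify a measured speed-up.
-- outside the precondition, e.g. on calcular_inicio_cuadrado((3, 4), 0, (3, 4)): A returns (3, 4), B raises ZeroDivisionError; on calcular_inicio_cuadrado((-10, -10), -5, (3, 4)): A returns (3, 4), B returns (-7, -6)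
import Mathlib
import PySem

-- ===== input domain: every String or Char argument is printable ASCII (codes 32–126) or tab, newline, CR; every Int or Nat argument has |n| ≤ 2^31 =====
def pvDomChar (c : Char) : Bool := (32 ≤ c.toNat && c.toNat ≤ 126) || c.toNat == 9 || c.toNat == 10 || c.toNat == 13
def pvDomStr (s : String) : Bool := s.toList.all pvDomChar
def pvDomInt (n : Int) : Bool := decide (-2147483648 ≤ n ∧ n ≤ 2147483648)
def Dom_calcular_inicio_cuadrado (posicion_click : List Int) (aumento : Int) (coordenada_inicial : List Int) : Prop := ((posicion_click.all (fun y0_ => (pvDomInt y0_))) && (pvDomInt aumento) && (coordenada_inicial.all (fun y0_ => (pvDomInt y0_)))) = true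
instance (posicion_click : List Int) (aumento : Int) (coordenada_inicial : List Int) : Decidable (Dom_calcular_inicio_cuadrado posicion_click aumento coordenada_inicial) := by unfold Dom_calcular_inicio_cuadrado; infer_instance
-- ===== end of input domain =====

-- B replaces A's origin-advancing while loop with a closed-form floor-division snap (simpler).

-- ===== PORT A =====
-- one body of A's while loop, acting on one coordinate (x, x_inicio)
def acStep (a x x0 : Int) : Int × Int :=
  if x < x0 + a then (x0, x0)
  else if x = x0 then (x, x0)
  else (x, x0 + a)

-- the while loop; fuel only makes the (possibly diverging) loop total, it is
-- large enough to be unreached on every input satisfying Pre_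
def acLoop (a : Int) : Nat → Int → Int → Int → Int → Int × Int
  | 0, x, _, y, _ => (x, y)
  | Nat.succ n, x, x0, y, y0 =>
    if x ≠ x0 ∨ y ≠ y0 then
      let p := acStep a x x0
      let q := acStep a y y0
      acLoop a n p.1 p.2 q.1 q.2
    else (x, y)

def calcular_inicio_cuadrado (posicion_click : List Int) (aumento : Int) (coordenada_inicial : List Int) : List Int :=
  match PySem.List.pyGet? posicion_click 0, PySem.List.pyGet? coordenada_inicial 0,
        PySem.List.pyGet? posicion_click 1, PySem.List.pyGet? coordenada_inicial 1 with
  | some x, some x0, some y, some y0 =>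
      let r := acLoop aumento ((x - x0).natAbs + (y - y0).natAbs + 2) x x0 y y0
      [r.1, r.2]
  | _, _, _, _ => []   -- IndexError in Python; excluded by Pre_

-- ===== PORT B =====
def snapCoord (a x x0 : Int) : Int := x0 + a * max 0 (PySem.Int.floordiv (x - x0) a)

def calcular_inicio_cuadrado_alt (posicion_click : List Int) (aumento : Int) (coordenada_inicial : List Int) : List Int :=
  -- IndexError in Python (a 'none' below) is excluded by Pre_
  match PySem.List.pyGet? posicion_click 0 with
  | none => []
  | some x =>
    match PySem.List.pyGet? posicion_click 1 with
    | none => []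
    | some y =>
      match PySem.List.pyGet? coordenada_inicial 0 with
      | none => []
      | some x0 =>
        match PySem.List.pyGet? coordenada_inicial 1 with
        | none => []
        | some y0 => [snapCoord aumento x x0, snapCoord aumento y y0]

-- ===== PRECONDITION & SPEC =====
-- Pre_ requires two coordinates in each tuple (shorter: IndexError) and aumento ≥ 1:
-- with aumento ≤ 0 A's while loop diverges on almost every click and returns only on
-- degenerate already-snapped corners (accidental values B does not match).
def Pre_calcular_inicio_cuadrado (posicion_click : List Int) (aumento : Int) (coordenada_inicial : List Int) : Prop :=
  2 ≤ posicion_click.length ∧ 2 ≤ coordenada_inicial.length ∧ 1 ≤ aumento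
instance (posicion_click : List Int) (aumento : Int) (coordenada_inicial : List Int) : Decidable (Pre_calcular_inicio_cuadrado posicion_click aumento coordenada_inicial) := by unfold Pre_calcular_inicio_cuadrado; infer_instance

def pvWitness_calcular_inicio_cuadrado : List Int × Int × List Int := ([13, -4], 5, [1, 0])

def Spec_calcular_inicio_cuadrado (posicion_click : List Int) (aumento : Int) (coordenada_inicial : List Int) (out : List Int) : Prop := out = calcular_inicio_cuadrado_alt posicion_click aumento coordenada_inicial
instance (posicion_click : List Int) (aumento : Int) (coordenada_inicial : List Int) (out : List Int) : Decidable (Spec_calcular_inicio_cuadrado posicion_click aumento coordenada_inicial out) := by unfold Spec_calcular_inicio_cuadrado; infer_instance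

-- ===== CLAIM (what is proved, stated in full; the proofs are below) =====
def Claim_equal_calcular_inicio_cuadrado : Prop := ∀ (posicion_click : List Int) (aumento : Int) (coordenada_inicial : List Int), Dom_calcular_inicio_cuadrado posicion_click aumento coordenada_inicial → Pre_calcular_inicio_cuadrado posicion_click aumento coordenada_inicial → Spec_calcular_inicio_cuadrado posicion_click aumento coordenada_inicial (calcular_inicio_cuadrado posicion_click aumento coordenada_inicial)

-- ===== LEMMAS AND PROOFS =====

-- loop measure for one coordinate
def acM (a x x0 : Int) : Nat :=
  if x = x0 then 0 else if x < x0 + a then 1 else (x - x0).natAbs + 1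

theorem fdiv_zero_pos (a : Int) : PySem.Int.floordiv 0 a = 0 := by
  simp [PySem.Int.floordiv]

theorem snap_self (a x0 : Int) : snapCoord a x0 x0 = x0 := by
  simp [snapCoord, fdiv_zero_pos]

theorem snap_step (a x x0 : Int) (ha : 1 ≤ a) :
    snapCoord a (acStep a x x0).1 (acStep a x x0).2 = snapCoord a x x0 := by
  unfold acStep
  split_ifs with h1 h2
  · -- x < x0 + a : step = (x0, x0)
    have hle : PySem.Int.floordiv (x - x0) a < 1 := by
      rw [PySem.Int.floordiv_lt_iff_lt_mul (by omega)]; omega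
    have hmax : max 0 (PySem.Int.floordiv (x - x0) a) = 0 := by omega
    rw [snap_self]
    simp [snapCoord, hmax]
  · rfl
  · -- x ≥ x0 + a : step = (x, x0 + a)
    set q := PySem.Int.floordiv (x - x0) a with hq
    have hb : q * a ≤ x - x0 ∧ x - x0 < (q + 1) * a :=
      (PySem.Int.floordiv_eq_iff_of_pos (by omega)).mp hq.symm
    have hq1 : 1 ≤ q := by
      rw [hq, PySem.Int.le_floordiv_iff_mul_le (by omega)]; omega
    have hstep : PySem.Int.floordiv (x - (x0 + a)) a = q - 1 := by
      rw [PySem.Int.floordiv_eq_iff_of_pos (by omega)]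
      constructor <;> nlinarith [hb.1, hb.2]
    simp only [snapCoord, hstep]
    have h1' : max 0 (q - 1) = q - 1 := by omega
    have h2' : max 0 q = q := by omega
    rw [h1', h2']; ring

theorem acM_step_lt (a x x0 : Int) (ha : 1 ≤ a) (hx : x ≠ x0) :
    acM a (acStep a x x0).1 (acStep a x x0).2 < acM a x x0 := by
  unfold acStep acM
  split_ifs <;> simp_all <;> omega

theorem acM_step_le (a x x0 : Int) (ha : 1 ≤ a) :
    acM a (acStep a x x0).1 (acStep a x x0).2 ≤ acM a x x0 := by
  by_cases hx : x = x0
  · subst hx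
    unfold acStep acM
    split_ifs <;> simp_all <;> omega
  · exact Nat.le_of_lt (acM_step_lt a x x0 ha hx)

theorem acM_eq_zero (a x x0 : Int) (h : acM a x x0 = 0) : x = x0 := by
  unfold acM at h; split_ifs at h <;> omega

theorem acLoop_eq_snap (a : Int) (ha : 1 ≤ a) :
    ∀ (fuel : Nat) (x x0 y y0 : Int), acM a x x0 + acM a y y0 ≤ fuel →
      acLoop a fuel x x0 y y0 = (snapCoord a x x0, snapCoord a y y0) := by
  intro fuel
  induction fuel with
  | zero =>
    intro x x0 y y0 hm
    have hx := acM_eq_zero a x x0 (by omega)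
    have hy := acM_eq_zero a y y0 (by omega)
    subst hx; subst hy
    simp [acLoop, snap_self]
  | succ n ih =>
    intro x x0 y y0 hm
    by_cases hc : x ≠ x0 ∨ y ≠ y0
    · have hdec : acM a (acStep a x x0).1 (acStep a x x0).2
          + acM a (acStep a y y0).1 (acStep a y y0).2 ≤ n := by
        have hx2 := acM_step_le a x x0 ha
        have hy2 := acM_step_le a y y0 ha
        rcases hc with hx | hy
        · have := acM_step_lt a x x0 ha hx; omega
        · have := acM_step_lt a y y0 ha hy; omega
      rw [acLoop, if_pos hc, ih _ _ _ _ hdec, snap_step a x x0 ha, snap_step a y y0 ha]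
    · push_neg at hc
      obtain ⟨hx, hy⟩ := hc
      subst hx; subst hy
      simp [acLoop, snap_self]

theorem acM_le_natAbs (a x x0 : Int) : acM a x x0 ≤ (x - x0).natAbs + 1 := by
  unfold acM; split_ifs <;> omega

-- ===== VERDICT (by name: the statement is the Claim_ definition above) =====
theorem calcular_inicio_cuadrado_spec : Claim_equal_calcular_inicio_cuadrado := by
  intro pc a ci _ hpre
  obtain ⟨hlen1, hlen2, ha⟩ := hpre
  match pc, ci with
  | x :: y :: pt, x0 :: y0 :: ct =>
    unfold Spec_calcular_inicio_cuadrado calcular_inicio_cuadrado calcular_inicio_cuadrado_alt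
    simp [pysem]
    rw [acLoop_eq_snap a ha ((x - x0).natAbs + (y - y0).natAbs + 2) x x0 y y0
      (by have := acM_le_natAbs a x x0; have := acM_le_natAbs a y y0; omega)]
    exact ⟨rfl, rfl⟩
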